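-- pv_equiv track=rewrite | github.com/os-fpga/Backend | flowscripts/place_opt/optimization.py | get_holes_options
-- ===== SOURCE A (Python) =====
-- MAX_PLANE           = 8                                     # number of planes in each tile for the current architecture.
--
-- def bb_enum(boxes, nballs, nboxes):
--     assert nboxes > 0
--     if nboxes == 1:
--         boxes[0] = nballs
--         yield 1
--         return
--     # if
--     nboxes -= 1
--     for b in range(nballs  + 1):
--         boxes[nboxes] = b
--         yield from bb_enum(boxes, nballs - b, nboxes)
--
-- def get_holes_options(e, f, a):
--     options = []
--     moving = (MAX_PLANE - e) - f
--     if moving < 0: return options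
--     # "a" is the number of internal adjacent carry connections on movable chains
--     # which cannot receive a hole
--     nballs = e                   # the empty holes we must distribute
--     nboxes = 1 + moving - a      # the places we can put them
--     boxes = [0] * nboxes
--     # log(f"\t\t\t e = {e}, f = {f}, a = {a}, nballs = {nballs}, nboxes = {nboxes}\n")
--     n = 0
--     # THIS LOOP IS THE "for 70" DISCUSSED
--     for _ in bb_enum(boxes, nballs, nboxes):
--         # log(f"\t\t\t\tboxes = {boxes}\n")
--         options.append(boxes.copy())
--         n += 1
--     return options
-- ===== SOURCE B (Python) =====
-- MAX_PLANE = 8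
--
-- def get_holes_options(e, f, a):
--     # Bottom-up DP over the number of boxes instead of A's mutating recursive
--     # generator: table[m] holds all compositions of m into k boxes (colex order);
--     # only the needed row of the final layer is materialised.
--     moving = (MAX_PLANE - e) - f
--     if moving < 0:
--         return []
--     nboxes = 1 + moving - a
--     assert nboxes > 0
--     if nboxes == 1:
--         return [[e]]
--     table = [[[m]] for m in range(e + 1)]          # k = 1
--     for _ in range(nboxes - 2):
--         table = [[row + [b] for b in range(m + 1) for row in table[m - b]]
--                  for m in range(e + 1)]
--     return [row + [b] for b in range(e + 1) for row in table[e - b]]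
-- ===== Notes on version B (the rewrite author's own statement) =====
-- stated objective: alternative
-- what changed: Replaces the mutating recursive generator (bb_enum writing into a shared boxes list) with a bottom-up dynamic-programming table over the number of boxes, where table[m] holds all compositions of m and each sub-list is built once and reused.
import Mathlib
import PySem

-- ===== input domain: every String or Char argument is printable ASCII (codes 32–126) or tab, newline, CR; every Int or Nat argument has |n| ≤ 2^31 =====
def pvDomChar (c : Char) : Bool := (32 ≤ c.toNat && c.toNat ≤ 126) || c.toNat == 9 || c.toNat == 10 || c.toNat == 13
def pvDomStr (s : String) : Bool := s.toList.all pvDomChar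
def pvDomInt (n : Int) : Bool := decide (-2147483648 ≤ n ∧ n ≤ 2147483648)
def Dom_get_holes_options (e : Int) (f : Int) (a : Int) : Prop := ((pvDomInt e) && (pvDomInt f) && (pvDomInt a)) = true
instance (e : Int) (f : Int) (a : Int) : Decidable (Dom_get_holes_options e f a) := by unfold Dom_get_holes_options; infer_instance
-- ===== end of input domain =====

-- B replaces A's mutating recursive generator by a bottom-up DP table over the
-- number of boxes (objective: alternative; same cost, sub-results shared).

-- ===== PORT A =====
-- bb_enum mutates `boxes` and yields snapshots; modelled as (snapshots, final boxes).
def bbEnum : Nat → List Int → Int → List (List Int) × List Int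
  | 0, boxes, _ => ([], boxes)          -- unreachable from get_holes_options under Pre_ (assert nboxes > 0)
  | 1, boxes, nballs =>
      let b := boxes.set 0 nballs
      ([b], b)
  | (k+2), boxes, nballs =>
      (PySem.List.pyRange 0 (nballs + 1) 1).foldl
        (fun acc b =>
          let r := bbEnum (k+1) (acc.2.set (k+1) b) (nballs - b)
          (acc.1 ++ r.1, r.2))
        ([], boxes)

def get_holes_options (e : Int) (f : Int) (a : Int) : List (List Int) :=
  let moving := (8 - e) - f
  if moving < 0 then []
  else
    let nboxes := 1 + moving - a
    (bbEnum nboxes.toNat (List.replicate nboxes.toNat 0) e).1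

-- ===== PORT B =====
def get_holes_options_alt (e : Int) (f : Int) (a : Int) : List (List Int) :=
  let moving := (8 - e) - f
  if moving < 0 then []
  else
    let nboxes := 1 + moving - a
    if nboxes = 1 then [[e]]
    else
      let init := (PySem.List.pyRange 0 (e + 1) 1).map (fun m => ([[m]] : List (List Int)))
      let table := (List.range (nboxes - 2).toNat).foldl
        (fun table _ =>
          (PySem.List.pyRange 0 (e + 1) 1).map (fun m =>
            (PySem.List.pyRange 0 (m + 1) 1).flatMap (fun b =>
              (PySem.List.pyGetD table (m - b) []).map (fun row => row ++ [b]))))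
        init
      (PySem.List.pyRange 0 (e + 1) 1).flatMap (fun b =>
        (PySem.List.pyGetD table (e - b) []).map (fun row => row ++ [b]))

-- ===== PRECONDITION & SPEC =====
-- Pre_ excludes exactly the inputs where A raises AssertionError (nboxes <= 0 reached).
def Pre_get_holes_options (e : Int) (f : Int) (a : Int) : Prop :=
  (8 - e) - f < 0 ∨ 0 < 1 + ((8 - e) - f) - a
instance (e : Int) (f : Int) (a : Int) : Decidable (Pre_get_holes_options e f a) := by
  unfold Pre_get_holes_options; infer_instance

def pvWitness_get_holes_options : Int × Int × Int := (2, 4, 1)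

def Spec_get_holes_options (e : Int) (f : Int) (a : Int) (out : List (List Int)) : Prop := out = get_holes_options_alt e f a
instance (e : Int) (f : Int) (a : Int) (out : List (List Int)) : Decidable (Spec_get_holes_options e f a out) := by unfold Spec_get_holes_options; infer_instance

-- ===== CLAIM (what is proved, stated in full; the proofs are below) =====
def Claim_equal_get_holes_options : Prop := ∀ (e : Int) (f : Int) (a : Int), Dom_get_holes_options e f a → Pre_get_holes_options e f a → Spec_get_holes_options e f a (get_holes_options e f a)

-- ===== LEMMAS AND PROOFS =====

-- pure specification: compositions of n into k boxes, in A's (colex) order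
def comps : Nat → Int → List (List Int)
  | 0, _ => []
  | 1, n => [[n]]
  | (k+2), n =>
      (PySem.List.pyRange 0 (n + 1) 1).flatMap
        (fun b => (comps (k+1) (n - b)).map (fun r => r ++ [b]))


lemma fold_aux (k : Nat)
    (IH : ∀ (n : Int) (boxes : List Int), k+1 ≤ boxes.length →
      (bbEnum (k+1) boxes n).1 = (comps (k+1) n).map (fun r => r ++ boxes.drop (k+1))
      ∧ (bbEnum (k+1) boxes n).2.length = boxes.length
      ∧ (bbEnum (k+1) boxes n).2.drop (k+1) = boxes.drop (k+1)) :
    ∀ (bs : List Int) (n : Int) (acc1 : List (List Int)) (L : List Int), k+2 ≤ L.length →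
    (bs.foldl (fun acc b =>
        let r := bbEnum (k+1) (acc.2.set (k+1) b) (n - b)
        (acc.1 ++ r.1, r.2)) (acc1, L)).1
      = acc1 ++ bs.flatMap (fun b => (comps (k+1) (n-b)).map (fun r => r ++ (b :: L.drop (k+2))))
    ∧ (bs.foldl (fun acc b =>
        let r := bbEnum (k+1) (acc.2.set (k+1) b) (n - b)
        (acc.1 ++ r.1, r.2)) (acc1, L)).2.length = L.length
    ∧ (bs.foldl (fun acc b =>
        let r := bbEnum (k+1) (acc.2.set (k+1) b) (n - b)
        (acc.1 ++ r.1, r.2)) (acc1, L)).2.drop (k+2) = L.drop (k+2) := by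
  intro bs
  induction bs with
  | nil => intro n acc1 L hL; simp
  | cons b bs ih =>
    intro n acc1 L hL
    have hklt : k + 1 < (L.set (k+1) b).length := by simp; omega
    have hdropset : (L.set (k+1) b).drop (k+1) = b :: L.drop (k+2) := by
      rw [List.drop_eq_getElem_cons hklt]
      simp [List.getElem_set_self, List.drop_set_of_lt (by omega : k+1 < k+2)]
    have h1 := IH (n-b) (L.set (k+1) b) (by simp; omega)
    set L' := (bbEnum (k+1) (L.set (k+1) b) (n-b)).2 with hL'
    have hlen' : L'.length = L.length := by simpa using h1.2.1
    have hdrop' : L'.drop (k+2) = L.drop (k+2) := by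
      have := h1.2.2
      rw [hdropset] at this
      have h2 : L'.drop (k+2) = (L'.drop (k+1)).drop 1 := by
        rw [List.drop_drop]
      rw [h2, this]
      simp
    have h3 := ih (n) (acc1 ++ (bbEnum (k+1) (L.set (k+1) b) (n-b)).1) L' (by omega)
    simp only [List.foldl_cons]
    refine ⟨?_, ?_, ?_⟩
    · rw [h3.1, h1.1, hdropset, hdrop']
      simp [List.flatMap_cons, List.append_assoc]
    · rw [h3.2.1, hlen']
    · rw [h3.2.2, hdrop']

lemma bbEnum_spec : ∀ (k : Nat) (n : Int) (boxes : List Int), k ≤ boxes.length →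
    (bbEnum k boxes n).1 = (comps k n).map (fun r => r ++ boxes.drop k)
    ∧ (bbEnum k boxes n).2.length = boxes.length
    ∧ (bbEnum k boxes n).2.drop k = boxes.drop k := by
  intro k
  induction k using Nat.strong_induction_on with
  | _ k IH =>
    match k with
    | 0 => intro n boxes h; simp [bbEnum, comps]
    | 1 =>
      intro n boxes h
      match boxes, h with
      | (x :: bx), _ => simp [bbEnum, comps]
    | (k+2) =>
      intro n boxes h
      have haux := fold_aux k (fun n bx hb => IH (k+1) (by omega) n bx hb)
        (PySem.List.pyRange 0 (n + 1) 1) n [] boxes h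
      simp only [bbEnum]
      refine ⟨?_, haux.2.1, haux.2.2⟩
      rw [haux.1]
      simp only [comps, List.map_flatMap, List.nil_append]
      apply List.flatMap_congr
      intro b hb
      simp [List.map_map, Function.comp, List.append_assoc]

lemma table_spec (e : Int) : ∀ (j : Nat),
    (List.range j).foldl
        (fun table _ =>
          (PySem.List.pyRange 0 (e + 1) 1).map (fun m =>
            (PySem.List.pyRange 0 (m + 1) 1).flatMap (fun b =>
              (PySem.List.pyGetD table (m - b) []).map (fun row => row ++ [b]))))
        ((PySem.List.pyRange 0 (e + 1) 1).map (fun m => ([[m]] : List (List Int))))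
      = (PySem.List.pyRange 0 (e + 1) 1).map (fun m => comps (j+1) m) := by
  intro j
  induction j with
  | zero => simp [comps]
  | succ j ih =>
    rw [List.range_succ, List.foldl_append, ih]
    simp only [List.foldl_cons, List.foldl_nil]
    apply List.map_congr_left
    intro m hm
    rw [PySem.List.mem_pyRange_one] at hm
    show _ = comps (j+2) m
    simp only [comps]
    apply List.flatMap_congr
    intro b hb
    rw [PySem.List.mem_pyRange_one] at hb
    rw [PySem.List.pyGetD_map_pyRange_of_nonneg _ _ _ _ (by omega) (by omega)]

lemma A_eq_comps (e n : Int) :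
    (bbEnum n.toNat (List.replicate n.toNat 0) e).1 = comps n.toNat e := by
  have h := (bbEnum_spec n.toNat e (List.replicate n.toNat 0) (by simp)).1
  rw [h, List.drop_replicate]
  simp

-- ===== VERDICT (by name: the statement is the Claim_ definition above) =====
theorem get_holes_options_spec : Claim_equal_get_holes_options := by
  intro e f a hdom hpre
  unfold Spec_get_holes_options get_holes_options get_holes_options_alt
  by_cases hm : (8 - e) - f < 0
  · simp [hm]
  · simp only [if_neg hm]
    have hnb : 0 < 1 + ((8 - e) - f) - a := by
      rcases hpre with h | h
      · exact absurd h hm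
      · exact h
    rw [A_eq_comps e _]
    by_cases h1 : 1 + ((8 - e) - f) - a = 1
    · rw [if_pos h1, h1]
      rfl
    · rw [if_neg h1]
      rw [table_spec e ((1 + ((8 - e) - f) - a - 2).toNat)]
      have hk : (1 + ((8 - e) - f) - a).toNat = ((1 + ((8 - e) - f) - a - 2).toNat) + 2 := by omega
      rw [hk]
      simp only [comps]
      apply List.flatMap_congr
      intro b hb
      rw [PySem.List.mem_pyRange_one] at hb
      rw [PySem.List.pyGetD_map_pyRange_of_nonneg _ _ _ _ (by omega) (by omega)]
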